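-- pv_equiv track=rewrite | github.com/oliolioli/Robotics | Color-Recognition-and-InterRoboCommunicationPooling/Color-Recognition.py | check_green
-- ===== SOURCE A (Python) =====
-- def check_green(x, y, r, g, b):
--     for i in range(10):
--         for j in range(10):
--             if (y+i > 119 or x+j > 159):
--                 return (False)
--             if (g[y+i][x+j] < r[y+i][x+j] + 15 or g[y+i][x+j] < b[y+i][x+j] + 15):
--                 return (False)
--     return (True)
-- ===== SOURCE B (Python) =====
-- def check_green(x, y, r, g, b):
--     # Phase 1: one closed-form bounds test for the whole 10x10 window
--     # (monotone collapse of A's per-pixel bound check).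
--     if y + 9 > 119 or x + 9 > 159:
--         return False
--     # Phase 2: structural recursion over a single flattened pixel counter
--     # k = 10*i + j, one conjunctive chain instead of nested loops with
--     # early returns.
--     def ok(k):
--         if k >= 100:
--             return True
--         i, j = divmod(k, 10)
--         gv = g[y + i][x + j]
--         return gv >= r[y + i][x + j] + 15 and gv >= b[y + i][x + j] + 15 and ok(k + 1)
--     return ok(0)
-- ===== Notes on version B (the rewrite author's own statement) =====
-- stated objective: alternative
-- what changed: A scans with two nested loops, a per-pixel bounds test and two early returns; B instead uses one closed-form whole-window bounds guard (the monotone collapse of A's per-pixel bound test) followed by a structural recursion over a single flattened pixel counter k=10*i+j with one short-circuit conjunctive chain; Pre_ excludes exactly the inputs on which A raises IndexError.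
import Mathlib
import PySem

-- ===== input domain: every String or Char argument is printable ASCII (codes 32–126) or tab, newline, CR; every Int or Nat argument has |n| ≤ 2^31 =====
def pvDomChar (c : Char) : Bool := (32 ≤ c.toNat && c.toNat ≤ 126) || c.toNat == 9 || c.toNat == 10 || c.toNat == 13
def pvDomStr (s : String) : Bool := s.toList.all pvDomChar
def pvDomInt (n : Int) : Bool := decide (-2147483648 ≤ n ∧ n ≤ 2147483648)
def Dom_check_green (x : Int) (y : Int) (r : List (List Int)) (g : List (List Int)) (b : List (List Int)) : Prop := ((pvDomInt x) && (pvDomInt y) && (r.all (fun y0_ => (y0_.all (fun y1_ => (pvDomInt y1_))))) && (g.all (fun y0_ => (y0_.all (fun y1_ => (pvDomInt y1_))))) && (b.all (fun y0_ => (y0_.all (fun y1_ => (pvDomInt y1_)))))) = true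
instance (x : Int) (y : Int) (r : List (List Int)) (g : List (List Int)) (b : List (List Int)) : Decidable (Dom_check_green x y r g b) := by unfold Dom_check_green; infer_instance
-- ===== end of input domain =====

-- B replaces A's nested loops (per-pixel bounds test, two early returns) by one
-- closed-form whole-window bounds guard plus a structural recursion over a single
-- flattened pixel counter (alternative decomposition, same cost).

-- shared model of the Python indexing expression m[row][col] (Python semantics,
-- including negative-index wraparound); `none` = IndexError, excluded by Pre_.
def pvPx (m : List (List Int)) (row col : Int) : Option Int :=
  (PySem.List.pyGet? m row).bind (fun rw => PySem.List.pyGet? rw col)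

-- value of m[row][col]; the default 0 stands in for Python's IndexError (Pre_ keeps
-- the ports away from inputs where the Pythons would actually raise).
def pvPxD (m : List (List Int)) (row col : Int) : Int := (pvPx m row col).getD 0

-- ===== PORT A =====
-- inner `for j in range(10)` loop of A: early `return False` becomes `false`.
def pvInnerA (x y : Int) (r g b : List (List Int)) (i : Nat) : List Nat → Bool
  | [] => true
  | j :: js =>
    if y + (i : Int) > 119 ∨ x + (j : Int) > 159 then false
    else if pvPxD g (y + i) (x + j) < pvPxD r (y + i) (x + j) + 15 ∨
            pvPxD g (y + i) (x + j) < pvPxD b (y + i) (x + j) + 15 then false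
    else pvInnerA x y r g b i js

-- outer `for i in range(10)` loop of A.
def pvOuterA (x y : Int) (r g b : List (List Int)) : List Nat → Bool
  | [] => true
  | i :: is => if pvInnerA x y r g b i (List.range 10) then pvOuterA x y r g b is else false

def check_green (x : Int) (y : Int) (r : List (List Int)) (g : List (List Int)) (b : List (List Int)) : Bool :=
  pvOuterA x y r g b (List.range 10)

-- ===== PORT B =====
-- Source B's inner recursive helper `ok(k)`: one flattened counter, i,j = divmod(k,10).
def pvOkB (x y : Int) (r g b : List (List Int)) (k : Nat) : Bool :=
  if k ≥ 100 then true
  else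
    decide (pvPxD g (y + (k / 10 : Nat)) (x + (k % 10 : Nat)) ≥
            pvPxD r (y + (k / 10 : Nat)) (x + (k % 10 : Nat)) + 15) &&
    decide (pvPxD g (y + (k / 10 : Nat)) (x + (k % 10 : Nat)) ≥
            pvPxD b (y + (k / 10 : Nat)) (x + (k % 10 : Nat)) + 15) &&
    pvOkB x y r g b (k + 1)
  termination_by 100 - k
  decreasing_by omega

def check_green_alt (x : Int) (y : Int) (r : List (List Int)) (g : List (List Int)) (b : List (List Int)) : Bool :=
  if y + 9 > 119 ∨ x + 9 > 159 then false
  else pvOkB x y r g b 0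

-- ===== PRECONDITION & SPEC =====
-- bound test of A at pixel (i,j) (no indexing happens when it fires).
def pvBnd (x y : Int) (i j : Nat) : Bool := decide (y + (i : Int) > 119 ∨ x + (j : Int) > 159)
-- the accesses A performs at pixel (i,j) all succeed (b is read only if g ≥ r+15).
def pvAccOK (x y : Int) (r g b : List (List Int)) (i j : Nat) : Bool :=
  (pvPx g (y + i) (x + j)).isSome && (pvPx r (y + i) (x + j)).isSome &&
  (decide (pvPxD g (y + i) (x + j) < pvPxD r (y + i) (x + j) + 15) ||
   (pvPx b (y + i) (x + j)).isSome)
-- A's scan moves past pixel (i,j): bounds ok, all three accesses succeed, color ok.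
def pvPass (x y : Int) (r g b : List (List Int)) (i j : Nat) : Bool :=
  !pvBnd x y i j &&
  (pvPx g (y + i) (x + j)).isSome && (pvPx r (y + i) (x + j)).isSome &&
  (pvPx b (y + i) (x + j)).isSome &&
  decide (pvPxD g (y + i) (x + j) ≥ pvPxD r (y + i) (x + j) + 15) &&
  decide (pvPxD g (y + i) (x + j) ≥ pvPxD b (y + i) (x + j) + 15)

-- Pre_ excludes EXACTLY the inputs on which A raises IndexError: at some pixel of
-- the scan order that A reaches (every earlier pixel passed, bounds ok there),
-- one of A's index accesses fails. On every input A returns on, Pre_ holds.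
def Pre_check_green (x : Int) (y : Int) (r : List (List Int)) (g : List (List Int)) (b : List (List Int)) : Prop :=
  ∀ i ∈ List.range 10, ∀ j ∈ List.range 10,
    (∀ i' ∈ List.range 10, ∀ j' ∈ List.range 10,
        (i' < i ∨ (i' = i ∧ j' < j)) → pvPass x y r g b i' j' = true) →
    pvBnd x y i j = false → pvAccOK x y r g b i j = true
instance (x : Int) (y : Int) (r : List (List Int)) (g : List (List Int)) (b : List (List Int)) : Decidable (Pre_check_green x y r g b) := by unfold Pre_check_green; infer_instance

def pvWitness_check_green : Int × Int × List (List Int) × List (List Int) × List (List Int) :=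
  (200, 0, [], [], [])

def Spec_check_green (x : Int) (y : Int) (r : List (List Int)) (g : List (List Int)) (b : List (List Int)) (out : Bool) : Prop := out = check_green_alt x y r g b
instance (x : Int) (y : Int) (r : List (List Int)) (g : List (List Int)) (b : List (List Int)) (out : Bool) : Decidable (Spec_check_green x y r g b out) := by unfold Spec_check_green; infer_instance

-- ===== CLAIM (what is proved, stated in full; the proofs are below) =====
def Claim_equal_check_green : Prop := ∀ (x : Int) (y : Int) (r : List (List Int)) (g : List (List Int)) (b : List (List Int)), Dom_check_green x y r g b → Pre_check_green x y r g b → Spec_check_green x y r g b (check_green x y r g b)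
-- ===== LEMMAS AND PROOFS =====

theorem pvInnerA_eq (x y : Int) (r g b : List (List Int)) (i : Nat) (js : List Nat) :
    pvInnerA x y r g b i js =
      js.all (fun j =>
        !decide (y + (i : Int) > 119 ∨ x + (j : Int) > 159) &&
        !decide (pvPxD g (y + i) (x + j) < pvPxD r (y + i) (x + j) + 15 ∨
                 pvPxD g (y + i) (x + j) < pvPxD b (y + i) (x + j) + 15)) := by
  induction js with
  | nil => simp [pvInnerA]
  | cons j js ih =>
    simp only [pvInnerA, List.all_cons, ih]
    split_ifs with h1 h2
    · simp [h1]
    · simp [h1, h2]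
    · simp [h1, h2]

theorem pvOuterA_eq (x y : Int) (r g b : List (List Int)) (is : List Nat) :
    pvOuterA x y r g b is = is.all (fun i => pvInnerA x y r g b i (List.range 10)) := by
  induction is with
  | nil => simp [pvOuterA]
  | cons i is ih =>
    simp only [pvOuterA, List.all_cons, ih]
    split_ifs with h <;> simp [h]

theorem pv_all_congr {α : Type} (l : List α) (p q : α → Bool)
    (h : ∀ a ∈ l, p a = q a) : l.all p = l.all q := by
  induction l with
  | nil => rfl
  | cons a l ih =>
    simp only [List.all_cons, h a (by simp), ih (fun a ha => h a (by simp [ha]))]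

-- Source B's recursion unrolled to an `all` over the remaining flattened counters.
theorem pvOkB_eq (x y : Int) (r g b : List (List Int)) :
    ∀ (n k : Nat), k + n = 100 →
    pvOkB x y r g b k =
      (List.range' k n).all (fun m =>
        decide (pvPxD g (y + (m / 10 : Nat)) (x + (m % 10 : Nat)) ≥
                pvPxD r (y + (m / 10 : Nat)) (x + (m % 10 : Nat)) + 15) &&
        decide (pvPxD g (y + (m / 10 : Nat)) (x + (m % 10 : Nat)) ≥
                pvPxD b (y + (m / 10 : Nat)) (x + (m % 10 : Nat)) + 15)) := by
  intro n
  induction n with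
  | zero =>
    intro k hk
    rw [pvOkB]
    simp [show k ≥ 100 by omega]
  | succ n ih =>
    intro k hk
    rw [pvOkB]
    rw [if_neg (by omega)]
    rw [List.range'_succ, List.all_cons, ih (k + 1) (by omega)]

-- flattening: an `all` over 10*n counters equals nested `all`s over i, j.
theorem pv_flatten (q : Nat → Bool) :
    ∀ (n : Nat),
    (List.range (10 * n)).all q =
      (List.range n).all (fun i => (List.range 10).all (fun j => q (10 * i + j))) := by
  intro n
  induction n with
  | zero => rfl
  | succ n ih =>
    rw [show 10 * (n + 1) = 10 * n + 10 from by ring, List.range_add, List.all_append, ih,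
        show List.range (n + 1) = List.range n ++ [n] from List.range_succ, List.all_append]
    congr 1
    simp [List.all_map, Function.comp_def]

theorem ports_eq (x y : Int) (r g b : List (List Int)) :
    check_green x y r g b = check_green_alt x y r g b := by
  unfold check_green check_green_alt
  rw [pvOuterA_eq]
  simp only [pvInnerA_eq]
  by_cases hb : y + 9 > 119 ∨ x + 9 > 159
  · rw [if_pos hb]
    rcases hb with hy | hx
    · refine List.all_eq_false.2 ⟨9, by simp, ?_⟩
      simp only [List.all_eq_true, not_forall]
      refine ⟨0, by simp, ?_⟩
      simp only [Bool.and_eq_true, Bool.not_eq_true', decide_eq_false_iff_not, not_or, not_lt,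
        Classical.not_and_iff_not_or_not, not_le]
      push_cast
      omega
    · refine List.all_eq_false.2 ⟨0, by simp, ?_⟩
      simp only [List.all_eq_true, not_forall]
      refine ⟨9, by simp, ?_⟩
      simp only [Bool.and_eq_true, Bool.not_eq_true', decide_eq_false_iff_not, not_or, not_lt,
        Classical.not_and_iff_not_or_not, not_le]
      push_cast
      omega
  · rw [if_neg hb]
    push Not at hb
    rw [pvOkB_eq x y r g b 100 0 rfl, ← List.range_eq_range',
        show (100 : Nat) = 10 * 10 from rfl, pv_flatten]
    refine pv_all_congr _ _ _ (fun i hi => ?_)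
    refine pv_all_congr _ _ _ (fun j hj => ?_)
    simp only [List.mem_range] at hi hj
    have h1 : (10 * i + j) / 10 = i := by omega
    have h2 : (10 * i + j) % 10 = j := by omega
    simp only [h1, h2]
    have hbnd : ¬ (y + (i : Int) > 119 ∨ x + (j : Int) > 159) := by omega
    simp only [hbnd, decide_false, Bool.not_false, Bool.true_and]
    by_cases hc : pvPxD g (y + i) (x + j) < pvPxD r (y + i) (x + j) + 15 ∨
                  pvPxD g (y + i) (x + j) < pvPxD b (y + i) (x + j) + 15
    · simp only [hc, decide_true, Bool.not_true]
      symm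
      simp only [Bool.and_eq_false_iff, decide_eq_false_iff_not, not_le]
      omega
    · simp only [hc, decide_false, Bool.not_false]
      symm
      simp only [Bool.and_eq_true, decide_eq_true_eq]
      omega

-- ===== VERDICT (by name: the statement is the Claim_ definition above) =====
theorem check_green_spec : Claim_equal_check_green := by
  intro x y r g b _ _
  unfold Spec_check_green
  exact ports_eq x y r g b
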